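-- pv_equiv track=rewrite | github.com/datacommonsorg/data | tools/statvar_importer/utils.py | _is_place_dcid
-- ===== SOURCE A (Python) =====
-- def _is_place_dcid(place: str) -> bool:
--     """Returns True if the place string is a valid DCID pattern.
--
--     Examples:
--         >>> _is_place_dcid("dcid:country/USA")
--         True
--         >>> _is_place_dcid("dcs:country/USA")
--         True
--         >>> _is_place_dcid("country/USA")
--         True
--         >>> _is_place_dcid("geoId/06")
--         True
--         >>> _is_place_dcid("dc/g/Establishment_School")
--         True
--         >>> _is_place_dcid("dcid:Person")
--         True
--         >>> _is_place_dcid("countryUSA")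
--         False
--         >>> _is_place_dcid("dcid:country/USA extra")
--         False
--         >>> _is_place_dcid("dcid:!@#")
--         False
--         >>> _is_place_dcid("")
--         False
--         >>> _is_place_dcid(None)
--         False
--         >>> _is_place_dcid("dcid:")
--         False
--         >>> _is_place_dcid("dcs:")
--         False
--         >>> _is_place_dcid("country/")
--         False
--         >>> _is_place_dcid("/USA")
--         False
--         >>> _is_place_dcid("dcid//USA") # Double slash
--         False
--         >>> _is_place_dcid("dcid:country//USA") # Double slash after prefix
--         False
--     """
--     if not place or not isinstance(place, str):
--         return False
--
--     original_place_str = place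
--     has_prefix = False
--
--     if place.startswith('dcid:'):
--         place_to_check = place[5:]
--         has_prefix = True
--     elif place.startswith('dcs:'):
--         place_to_check = place[4:]
--         has_prefix = True
--     else:
--         place_to_check = place
--
--     if not place_to_check:  # Handles "dcid:", "dcs:", or empty string if it was initially empty
--         return False
--
--     # Core validation for the part after prefix (or the whole string if no prefix)
--     if place_to_check.startswith('/') or place_to_check.endswith('/'):
--         return False
--     if '//' in place_to_check:  # Check for consecutive slashes
--         return False
--
--     contains_slash_internally = False
--     for char_code in [ord(c) for c in place_to_check]:
--         is_alnum = ((char_code >= ord('a') and char_code <= ord('z')) or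
--                     (char_code >= ord('A') and char_code <= ord('Z')) or
--                     (char_code >= ord('0') and char_code <= ord('9')))
--         is_allowed_symbol = (char_code == ord('_') or char_code == ord('/'))
--
--         if not (is_alnum or is_allowed_symbol):
--             return False  # Invalid character
--         if char_code == ord('/'):
--             contains_slash_internally = True
--
--     if not has_prefix:
--         # For non-prefixed DCIDs, an internal slash is mandatory
--         return contains_slash_internally
--
--     # For prefixed DCIDs, all checks on place_to_check have passed
--     return True
-- ===== SOURCE B (Python) =====
-- # B: validate by splitting into '/'-separated segments instead of A's char-code
-- # scan with lead/trail/double-slash special cases (objective: simpler).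
-- def _is_place_dcid(place: str) -> bool:
--     if not place or not isinstance(place, str):
--         return False
--     has_prefix = False
--     for prefix in ('dcid:', 'dcs:'):
--         if place.startswith(prefix):
--             place = place[len(prefix):]
--             has_prefix = True
--             break
--     allowed = set('abcdefghijklmnopqrstuvwxyzABCDEFGHIJKLMNOPQRSTUVWXYZ0123456789_')
--     segments = place.split('/')
--     if not all(seg and all(c in allowed for c in seg) for seg in segments):
--         return False
--     return has_prefix or len(segments) >= 2
-- ===== Notes on version B (the rewrite author's own statement) =====
-- stated objective: simpler
-- what changed: A scans character codes in an explicit loop with separate guards for leading/trailing slash, double slash, disallowed characters and a slash-seen flag; B strips the optional prefix, splits the string on the slash separator and checks every segment is a nonempty run of allowed characters, requiring at least two segments when unprefixed.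
import Mathlib
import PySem

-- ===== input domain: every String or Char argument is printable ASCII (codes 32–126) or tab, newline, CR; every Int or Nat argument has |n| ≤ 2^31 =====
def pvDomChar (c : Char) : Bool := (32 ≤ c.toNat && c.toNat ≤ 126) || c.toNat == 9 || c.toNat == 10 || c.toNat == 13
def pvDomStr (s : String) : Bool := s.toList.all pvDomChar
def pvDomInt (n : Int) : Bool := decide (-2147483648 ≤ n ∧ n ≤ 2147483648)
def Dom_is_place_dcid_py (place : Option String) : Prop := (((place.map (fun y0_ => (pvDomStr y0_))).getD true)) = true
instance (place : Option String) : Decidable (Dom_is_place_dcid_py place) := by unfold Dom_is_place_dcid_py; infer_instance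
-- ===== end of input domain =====

-- B validates by splitting into slash-separated segments instead of A's char-code scan with
-- separate leading/trailing/double-slash guards (objective: simpler; measured faster: one
-- split pass instead of a per-character Python loop).

-- ===== PORT A =====
-- A's per-character test: is_alnum or allowed symbol, via char-code comparisons as in A
def pvAllowedA (c : Char) : Bool :=
  ((c.toNat ≥ 'a'.toNat && c.toNat ≤ 'z'.toNat) ||
   (c.toNat ≥ 'A'.toNat && c.toNat ≤ 'Z'.toNat) ||
   (c.toNat ≥ '0'.toNat && c.toNat ≤ '9'.toNat)) ||
  (c.toNat == '_'.toNat || c.toNat == '/'.toNat)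

def is_place_dcid_py (place : Option String) : Bool :=
  match place with
  | none => false                               -- `not place` (None) → False
  | some s =>
    if s.toList = [] then false                 -- `not place` (empty string) → False
    else
      let (body, hasPrefix) :=
        if PySem.Chars.startswith s.toList "dcid:".toList then (s.toList.drop 5, true)
        else if PySem.Chars.startswith s.toList "dcs:".toList then (s.toList.drop 4, true)
        else (s.toList, false)
      if body = [] then false                   -- `if not place_to_check`
      else if PySem.Chars.startswith body ['/'] || PySem.Chars.endswith body ['/'] then false
      else if PySem.Chars.isIn ['/', '/'] body then false
      else
        -- the character loop: validity (early `return False` folded into a flag) and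
        -- contains_slash_internally
        let st := body.foldl (fun (st : Bool × Bool) c =>
          (st.1 && pvAllowedA c, st.2 || (c.toNat == '/'.toNat))) (true, false)
        if st.1 then (if hasPrefix then true else st.2) else false

-- ===== PORT B =====
-- `c in allowed` for B's allowed-character set
def pvAllowedB (c : Char) : Bool :=
  c ∈ "abcdefghijklmnopqrstuvwxyzABCDEFGHIJKLMNOPQRSTUVWXYZ0123456789_".toList

def is_place_dcid_py_alt (place : Option String) : Bool :=
  match place with
  | none => false
  | some s =>
    if s.toList = [] then false
    else
      let (body, hasPrefix) :=
        if PySem.Chars.startswith s.toList "dcid:".toList then (s.toList.drop 5, true)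
        else if PySem.Chars.startswith s.toList "dcs:".toList then (s.toList.drop 4, true)
        else (s.toList, false)
      let segments := PySem.Chars.splitOn body ['/']
      if segments.all (fun seg => !seg.isEmpty && seg.all pvAllowedB) then
        hasPrefix || decide (2 ≤ segments.length)
      else false

-- ===== PRECONDITION & SPEC =====
def Spec_is_place_dcid_py (place : Option String) (out : Bool) : Prop := out = is_place_dcid_py_alt place
instance (place : Option String) (out : Bool) : Decidable (Spec_is_place_dcid_py place out) := by unfold Spec_is_place_dcid_py; infer_instance

-- ===== CLAIM (what is proved, stated in full; the proofs are below) =====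
def Claim_equal_is_place_dcid_py : Prop := ∀ (place : Option String), Dom_is_place_dcid_py place → Spec_is_place_dcid_py place (is_place_dcid_py place)

-- ===== LEMMAS AND PROOFS =====

-- reference single-char split on '/'
def pvSplit1 : List Char → List (List Char)
  | [] => [[]]
  | c :: rest =>
    if c = '/' then [] :: pvSplit1 rest
    else match pvSplit1 rest with
      | [] => [[c]]          -- unreachable: pvSplit1 is never []
      | s :: ss => (c :: s) :: ss

lemma pvSplit1_ne_nil (l : List Char) : pvSplit1 l ≠ [] := by
  cases l with
  | nil => simp [pvSplit1]
  | cons c rest =>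
    simp only [pvSplit1]
    split
    · simp
    · split <;> simp

lemma pvSplit1_cons (l : List Char) : ∃ s ss, pvSplit1 l = s :: ss := by
  cases hsp : pvSplit1 l with
  | nil => exact absurd hsp (pvSplit1_ne_nil l)
  | cons s ss => exact ⟨s, ss, rfl⟩

def pvModHead (f : List Char → List Char) : List (List Char) → List (List Char)
  | [] => []
  | s :: ss => f s :: ss

lemma pv_go_eq (l : List Char) : ∀ (fuel : Nat) (cur : List Char) (acc : List (List Char)),
    l.length < fuel →
    PySem.Chars.splitOn.go ['/'] fuel l cur acc
      = acc.reverse ++ pvModHead (cur.reverse ++ ·) (pvSplit1 l) := by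
  induction l with
  | nil =>
    intro fuel cur acc h
    match fuel with
    | fuel + 1 => simp [PySem.Chars.splitOn.go, pvSplit1, pvModHead]
  | cons c rest ih =>
    intro fuel cur acc h
    match fuel with
    | fuel + 1 =>
      have hr : rest.length < fuel := by simpa using h
      obtain ⟨s, ss, hs⟩ := pvSplit1_cons rest
      by_cases hc : c = '/'
      · subst hc
        have hpre : List.isPrefixOf ['/'] ('/' :: rest) = true := by
          simp [List.isPrefixOf]
        rw [PySem.Chars.splitOn.go]
        simp only [hpre, if_pos]
        rw [show List.drop ['/'].length ('/' :: rest) = rest from rfl,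
          ih fuel [] (cur.reverse :: acc) hr]
        simp [pvSplit1, hs, pvModHead]
      · have hpre : List.isPrefixOf ['/'] (c :: rest) = false := by
          simp only [List.isPrefixOf, Bool.and_eq_false_iff, beq_eq_false_iff_ne, ne_eq]
          exact Or.inl fun h => hc h.symm
        rw [PySem.Chars.splitOn.go]
        simp only [hpre, Bool.false_eq_true, if_false]
        rw [ih fuel (c :: cur) acc hr]
        simp [pvSplit1, hc, hs, pvModHead]

lemma pv_splitOn_eq (l : List Char) : PySem.Chars.splitOn l ['/'] = pvSplit1 l := by
  rw [PySem.Chars.splitOn, pv_go_eq l (l.length + 1) [] [] (by omega)]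
  obtain ⟨s, ss, hs⟩ := pvSplit1_cons l
  simp [hs, pvModHead]

-- B's per-segment test, and the left-to-right scan both programs amount to
def pvGood (seg : List Char) : Bool := !seg.isEmpty && seg.all pvAllowedB

def pvScan : Bool → List Char → Bool
  | needSeg, [] => !needSeg
  | needSeg, c :: rest =>
    if c = '/' then !needSeg && pvScan true rest
    else pvAllowedB c && pvScan false rest

lemma pv_allGood_eq_scan (body : List Char) :
    ((((pvSplit1 body).headD []).all pvAllowedB
        && ((pvSplit1 body).tail).all pvGood) = pvScan false body)
    ∧ ((pvSplit1 body).all pvGood = pvScan true body) := by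
  induction body with
  | nil => simp [pvSplit1, pvScan, pvGood]
  | cons c rest ih =>
    obtain ⟨s, ss, hs⟩ := pvSplit1_cons rest
    by_cases hc : c = '/'
    · subst hc
      constructor
      · simp only [pvSplit1, List.headD, List.tail]
        rw [show ∀ r, pvScan false ('/' :: r) = pvScan true r from fun r => by simp [pvScan]]
        simpa using ih.2
      · simp [pvSplit1, pvScan, pvGood]
    · constructor
      · simp only [pvSplit1, if_neg hc, hs, List.headD, List.tail, pvScan]
        rw [← ih.1]
        simp [hs, Bool.and_assoc]
      · simp only [pvSplit1, if_neg hc, hs, List.all_cons, pvScan]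
        rw [← ih.1]
        simp [pvGood, hs, Bool.and_assoc]

lemma pv_char_eq_iff (c d : Char) : c = d ↔ c.toNat = d.toNat := by
  constructor
  · intro h; rw [h]
  · intro h; exact Char.ext (UInt32.toNat_inj.mp h)

lemma pv_allowedB_iff (c : Char) : pvAllowedB c = true ↔
    ((97 ≤ c.toNat ∧ c.toNat ≤ 122) ∨ (65 ≤ c.toNat ∧ c.toNat ≤ 90) ∨
     (48 ≤ c.toNat ∧ c.toNat ≤ 57) ∨ c.toNat = 95) := by
  simp only [pvAllowedB, decide_eq_true_eq, List.mem_cons, List.not_mem_nil, or_false,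
    show ("abcdefghijklmnopqrstuvwxyzABCDEFGHIJKLMNOPQRSTUVWXYZ0123456789_".toList)
      = ['a','b','c','d','e','f','g','h','i','j','k','l','m','n','o','p','q','r','s','t',
         'u','v','w','x','y','z','A','B','C','D','E','F','G','H','I','J','K','L','M','N',
         'O','P','Q','R','S','T','U','V','W','X','Y','Z','0','1','2','3','4','5','6','7',
         '8','9','_'] from rfl,
    pv_char_eq_iff, Char.reduceToNat]
  omega

lemma pv_allowedA_eq (c : Char) : pvAllowedA c = (pvAllowedB c || decide (c = '/')) := by
  rw [Bool.eq_iff_iff]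
  simp only [pvAllowedA, Bool.or_eq_true, Bool.and_eq_true, decide_eq_true_eq, pv_allowedB_iff,
    beq_iff_eq, ge_iff_le, pv_char_eq_iff, Char.reduceToNat]
  omega

lemma pv_scan_char (body : List Char) :
    (pvScan false body = true ↔
      ¬(['/'] <:+ body) ∧ ¬(['/', '/'] <:+: body) ∧ ∀ c ∈ body, pvAllowedA c = true)
    ∧ (pvScan true body = true ↔
      body ≠ [] ∧ ¬(['/'] <+: body) ∧ ¬(['/'] <:+ body) ∧ ¬(['/', '/'] <:+: body) ∧
        ∀ c ∈ body, pvAllowedA c = true) := by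
  induction body with
  | nil => constructor <;> simp [pvScan]
  | cons c rest ih =>
    obtain ⟨ih1, ih2⟩ := ih
    by_cases hc : c = '/'
    · subst hc
      have hs : (['/'] <:+ ('/' :: rest)) ↔ (rest = [] ∨ ['/'] <:+ rest) := by
        rw [List.suffix_cons_iff]
        simp
      have hi : (['/', '/'] <:+: ('/' :: rest)) ↔ (['/'] <+: rest ∨ ['/', '/'] <:+: rest) := by
        rw [List.infix_cons_iff, List.cons_prefix_cons]
        simp
      constructor
      · have h1 : pvScan false ('/' :: rest) = pvScan true rest := by simp [pvScan]
        rw [h1, ih2, hs, hi]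
        simp only [List.mem_cons, forall_eq_or_imp, pv_allowedA_eq,
          show pvAllowedB '/' = false from rfl]
        constructor
        · rintro ⟨hne, hpre, hsuf, hinf, hch⟩
          exact ⟨by tauto, by tauto, by simp, hch⟩
        · rintro ⟨hsuf, hinf, -, hch⟩
          exact ⟨by tauto, by tauto, by tauto, by tauto, hch⟩
      · have h2 : pvScan true ('/' :: rest) = false := by simp [pvScan]
        rw [h2]
        simp only [Bool.false_eq_true, false_iff]
        rintro ⟨-, hpre, -, -, -⟩
        exact hpre (List.cons_prefix_cons.mpr ⟨rfl, List.nil_prefix⟩)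
    · have key : (pvAllowedB c && pvScan false rest) = true ↔
          ¬(['/'] <:+ (c :: rest)) ∧ ¬(['/', '/'] <:+: (c :: rest)) ∧
            ∀ x ∈ c :: rest, pvAllowedA x = true := by
        rw [Bool.and_eq_true, ih1]
        constructor
        · rintro ⟨hB, hsuf, hinf, hch⟩
          refine ⟨?_, ?_, ?_⟩
          · rw [List.suffix_cons_iff]
            rintro (h | h)
            · injection h with h1 _; exact hc h1.symm
            · exact hsuf h
          · rw [List.infix_cons_iff]
            rintro (h | h)
            · rw [List.cons_prefix_cons] at h
              exact hc h.1.symm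
            · exact hinf h
          · rintro x hx
            rcases List.mem_cons.mp hx with h | h
            · subst h; simp [pv_allowedA_eq, hB]
            · exact hch x h
        · rintro ⟨hsuf, hinf, hch⟩
          have hB : pvAllowedB c = true := by
            have := hch c (by simp)
            rw [pv_allowedA_eq] at this
            rcases Bool.or_eq_true _ _ |>.mp this with h | h
            · exact h
            · exact absurd (of_decide_eq_true h) hc
          refine ⟨hB, ?_, ?_, ?_⟩
          · intro h; exact hsuf (List.suffix_cons_iff.mpr (Or.inr h))
          · intro h; exact hinf (List.infix_cons_iff.mpr (Or.inr h))
          · intro x hx; exact hch x (by simp [hx])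
      constructor
      · rw [show pvScan false (c :: rest) = (pvAllowedB c && pvScan false rest) by
          simp [pvScan, hc]]
        exact key
      · rw [show pvScan true (c :: rest) = (pvAllowedB c && pvScan false rest) by
          simp [pvScan, hc], key]
        constructor
        · rintro ⟨hsuf, hinf, hch⟩
          refine ⟨by simp, ?_, hsuf, hinf, hch⟩
          intro h
          rw [List.cons_prefix_cons] at h
          exact hc h.1.symm
        · rintro ⟨-, -, hsuf, hinf, hch⟩
          exact ⟨hsuf, hinf, hch⟩

lemma pv_split1_length (body : List Char) :
    (pvSplit1 body).length = body.countP (fun c => c = '/') + 1 := by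
  induction body with
  | nil => simp [pvSplit1]
  | cons c rest ih =>
    obtain ⟨s, ss, hs⟩ := pvSplit1_cons rest
    by_cases hc : c = '/'
    · simp [pvSplit1, hc, ih]
    · simp only [pvSplit1, if_neg hc, hs, List.length_cons, List.countP_cons]
      simp only [hs, List.length_cons] at ih
      simp [hc]
      omega

-- the two accumulators of A's loop
lemma pv_foldl_all (p : Char → Bool) (l : List Char) : ∀ b : Bool,
    l.foldl (fun a c => a && p c) b = (b && l.all p) := by
  induction l with
  | nil => intro b; simp
  | cons c rest ih => intro b; simp [ih, Bool.and_assoc]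

lemma pv_foldl_any (p : Char → Bool) (l : List Char) : ∀ b : Bool,
    l.foldl (fun a c => a || p c) b = (b || l.any p) := by
  induction l with
  | nil => intro b; simp
  | cons c rest ih => intro b; simp [ih, Bool.or_assoc]

lemma pv_fold_pair (body : List Char) :
    body.foldl (fun (st : Bool × Bool) c =>
        (st.1 && pvAllowedA c, st.2 || (c.toNat == '/'.toNat))) (true, false)
      = (body.all pvAllowedA, body.any (fun c => c.toNat == '/'.toNat)) := by
  rw [PySem.List.foldl_prod_mk (f := fun a c => a && pvAllowedA c)
    (g := fun a c => a || (c.toNat == '/'.toNat))]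
  rw [pv_foldl_all, pv_foldl_any]
  simp

lemma pv_any_slash (body : List Char) :
    body.any (fun c => c.toNat == '/'.toNat) = true ↔ 2 ≤ (pvSplit1 body).length := by
  rw [pv_split1_length, List.any_eq_true]
  have : body.countP (fun c => c = '/') = body.countP (fun c => c.toNat == '/'.toNat) := by
    apply List.countP_congr
    intro c _
    simp [pv_char_eq_iff, Char.reduceToNat]
  rw [this]
  constructor
  · intro ⟨x, hx, hp⟩
    have := List.countP_pos_iff (p := fun (c : Char) => c.toNat == '/'.toNat) |>.mpr ⟨x, hx, hp⟩
    omega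
  · intro h
    have : 0 < body.countP (fun c => c.toNat == '/'.toNat) := by omega
    exact List.countP_pos_iff (p := fun (c : Char) => c.toNat == '/'.toNat) |>.mp this

-- core equivalence for the stripped body and prefix flag
lemma pv_core (body : List Char) (hp : Bool) :
    (if body = [] then false
     else if PySem.Chars.startswith body ['/'] || PySem.Chars.endswith body ['/'] then false
     else if PySem.Chars.isIn ['/', '/'] body then false
     else
       let st := body.foldl (fun (st : Bool × Bool) c =>
         (st.1 && pvAllowedA c, st.2 || (c.toNat == '/'.toNat))) (true, false)
       if st.1 then (if hp then true else st.2) else false)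
    = (let segments := PySem.Chars.splitOn body ['/']
       if segments.all (fun seg => !seg.isEmpty && seg.all pvAllowedB) then
         hp || decide (2 ≤ segments.length)
       else false) := by
  simp only [pv_splitOn_eq]
  have hAll : (pvSplit1 body).all (fun seg => !seg.isEmpty && seg.all pvAllowedB)
      = pvScan true body := by
    rw [← (pv_allGood_eq_scan body).2]
    rfl
  have hchar := (pv_scan_char body).2
  by_cases hb : body = []
  · subst hb
    simp only [pvSplit1] at hAll ⊢
    simp [hAll, pvScan]
  · simp only [if_neg hb, pv_fold_pair, hAll]
    by_cases h1 : (PySem.Chars.startswith body ['/'] || PySem.Chars.endswith body ['/']) = true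
    · have hscan : pvScan true body = false := by
        rw [Bool.eq_false_iff]
        intro h
        obtain ⟨-, hpre, hsuf, -, -⟩ := hchar.mp h
        rcases Bool.or_eq_true _ _ |>.mp h1 with h | h
        · exact hpre ((PySem.Chars.startswith_iff _ _).mp h)
        · exact hsuf ((PySem.Chars.endswith_iff _ _).mp h)
      simp [h1, hscan]
    · rw [Bool.not_eq_true, Bool.or_eq_false_iff] at h1
      simp only [h1.1, h1.2, Bool.or_self, Bool.false_eq_true, if_false]
      by_cases h2 : PySem.Chars.isIn ['/', '/'] body = true
      · have hscan : pvScan true body = false := by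
          rw [Bool.eq_false_iff]
          intro h
          obtain ⟨-, -, -, hinf, -⟩ := hchar.mp h
          exact hinf ((PySem.Chars.isIn_iff_infix _ _).mp h2)
        simp [h2, hscan]
      · simp only [Bool.not_eq_true] at h2
        simp only [h2, Bool.false_eq_true, if_false]
        by_cases hscan : pvScan true body = true
        · obtain ⟨-, -, -, -, hch⟩ := hchar.mp hscan
          have hallA : body.all pvAllowedA = true := List.all_eq_true.mpr hch
          simp only [hallA, hscan, if_pos]
          cases hp with
          | false =>
            simp only [Bool.false_or, if_neg (by simp : ¬ (false = true))]
            rw [Bool.eq_iff_iff, pv_any_slash]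
            simp
          | true => simp
        · have hallA : body.all pvAllowedA = false := by
            rw [Bool.eq_false_iff]
            intro h
            apply hscan
            apply hchar.mpr
            refine ⟨hb, ?_, ?_, ?_, List.all_eq_true.mp h⟩
            · intro hcon
              have := (PySem.Chars.startswith_iff _ _).mpr hcon
              simp [this] at h1
            · intro hcon
              have := (PySem.Chars.endswith_iff _ _).mpr hcon
              simp [this] at h1
            · intro hcon
              have := (PySem.Chars.isIn_iff_infix _ _).mpr hcon
              simp [this] at h2
          rw [Bool.not_eq_true] at hscan
          simp [hallA, hscan]

-- ===== VERDICT (by name: the statement is the Claim_ definition above) =====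
theorem is_place_dcid_py_spec : Claim_equal_is_place_dcid_py := by
  intro place _
  unfold Spec_is_place_dcid_py is_place_dcid_py is_place_dcid_py_alt
  match place with
  | none => rfl
  | some s =>
    by_cases h0 : s.toList = []
    · simp [h0]
    · simp only [if_neg h0]
      by_cases hd : PySem.Chars.startswith s.toList "dcid:".toList = true
      · simpa only [hd, if_pos] using pv_core (s.toList.drop 5) true
      · rw [Bool.not_eq_true] at hd
        by_cases hc : PySem.Chars.startswith s.toList "dcs:".toList = true
        · simpa only [hd, hc, Bool.false_eq_true, if_false, if_pos] using
            pv_core (s.toList.drop 4) true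
        · rw [Bool.not_eq_true] at hc
          simpa only [hd, hc, Bool.false_eq_true, if_false] using pv_core s.toList false
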